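-- pv_equiv track=rewrite | github.com/sanslayr/polymarket-weatherbot | scripts/synoptic_pattern_module.py | build_level_layers
-- ===== SOURCE A (Python) =====
-- from typing import Any, Callable
--
-- def build_level_layers(systems: list[dict[str, Any]]) -> dict[str, list[dict[str, Any]]]:
--     layers: dict[str, list[dict[str, Any]]] = {
--         "planetary": [],
--         "500": [],
--         "850": [],
--         "mslp": [],
--         "other": [],
--     }
--     for system in systems:
--         level = str(system.get("level", "")).lower()
--         scale = str(system.get("scale", "")).lower()
--         if scale == "planetary":
--             layers["planetary"].append(system)
--             continue
--         if level in {"500", "850", "mslp"}: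
--             layers[level].append(system)
--         else:
--             layers["other"].append(system)
--     return layers
-- ===== SOURCE B (Python) =====
-- def build_level_layers(systems: list[dict[str, str]]) -> dict[str, list[dict[str, str]]]:
--     def is_planetary(s):
--         return str(s.get("scale", "")).lower() == "planetary"
--
--     def level_of(s):
--         return str(s.get("level", "")).lower()
--
--     return {
--         "planetary": [s for s in systems if is_planetary(s)],
--         "500": [s for s in systems if not is_planetary(s) and level_of(s) == "500"],
--         "850": [s for s in systems if not is_planetary(s) and level_of(s) == "850"],
--         "mslp": [s for s in systems if not is_planetary(s) and level_of(s) == "mslp"],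
--         "other": [s for s in systems
--                   if not is_planetary(s) and level_of(s) not in ("500", "850", "mslp")],
--     }
-- ===== Notes on version B (the rewrite author's own statement) =====
-- stated objective: alternative
-- what changed: Replaces the single stateful bucketing loop over a mutable dict with five independent filtering passes, one comprehension per layer, assembled into the dict literal in the fixed key order.
import Mathlib
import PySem

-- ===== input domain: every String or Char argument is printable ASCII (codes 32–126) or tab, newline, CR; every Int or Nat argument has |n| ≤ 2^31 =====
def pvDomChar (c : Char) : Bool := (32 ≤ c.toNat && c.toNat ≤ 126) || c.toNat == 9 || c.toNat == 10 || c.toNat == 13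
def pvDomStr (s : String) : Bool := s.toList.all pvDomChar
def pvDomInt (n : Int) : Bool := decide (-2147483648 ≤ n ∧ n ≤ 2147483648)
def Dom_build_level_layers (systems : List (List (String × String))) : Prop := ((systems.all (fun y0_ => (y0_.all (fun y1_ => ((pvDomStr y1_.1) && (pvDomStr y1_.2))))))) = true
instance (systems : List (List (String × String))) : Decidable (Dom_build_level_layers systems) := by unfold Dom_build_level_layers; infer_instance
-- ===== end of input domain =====

-- B replaces A's single stateful bucketing loop with five independent filter passes (objective: alternative decomposition).

-- ===== PORT A =====
-- A's loop body: bucket one system into the layers dict (the `for` body of the Python, verbatim).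
def bllStep (layers : PySem.Dict String (List (List (String × String)))) (system : List (String × String)) :
    PySem.Dict String (List (List (String × String))) :=
  let level := PySem.Str.lower ((PySem.Dict.mk system).getD "level" "")
  let scale := PySem.Str.lower ((PySem.Dict.mk system).getD "scale" "")
  if scale == "planetary" then
    layers.modify "planetary" [] (· ++ [system])
  else if level == "500" || level == "850" || level == "mslp" then
    layers.modify level [] (· ++ [system])
  else
    layers.modify "other" [] (· ++ [system])

def build_level_layers (systems : List (List (String × String))) : List (String × List (List (String × String))) :=
  let layers : PySem.Dict String (List (List (String × String))) :=
    PySem.Dict.ofList [("planetary", []), ("500", []), ("850", []), ("mslp", []), ("other", [])]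
  (systems.foldl bllStep layers).items

-- ===== PORT B =====
def bll_isPlanetary (system : List (String × String)) : Bool :=
  PySem.Str.lower ((PySem.Dict.mk system).getD "scale" "") == "planetary"

def bll_levelOf (system : List (String × String)) : String :=
  PySem.Str.lower ((PySem.Dict.mk system).getD "level" "")

def build_level_layers_alt (systems : List (List (String × String))) : List (String × List (List (String × String))) :=
  [ ("planetary", systems.filter (fun s => bll_isPlanetary s)),
    ("500", systems.filter (fun s => !bll_isPlanetary s && bll_levelOf s == "500")),
    ("850", systems.filter (fun s => !bll_isPlanetary s && bll_levelOf s == "850")),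
    ("mslp", systems.filter (fun s => !bll_isPlanetary s && bll_levelOf s == "mslp")),
    ("other", systems.filter (fun s =>
      !bll_isPlanetary s && !(bll_levelOf s == "500" || bll_levelOf s == "850" || bll_levelOf s == "mslp"))) ]

-- ===== PRECONDITION & SPEC =====
def Spec_build_level_layers (systems : List (List (String × String))) (out : List (String × List (List (String × String)))) : Prop := out = build_level_layers_alt systems
instance (systems : List (List (String × String))) (out : List (String × List (List (String × String)))) : Decidable (Spec_build_level_layers systems out) := by unfold Spec_build_level_layers; infer_instance

-- ===== CLAIM (what is proved, stated in full; the proofs are below) =====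
def Claim_equal_build_level_layers : Prop := ∀ (systems : List (List (String × String))), Dom_build_level_layers systems → Spec_build_level_layers systems (build_level_layers systems)

-- ===== LEMMAS AND PROOFS =====

-- the 5-bucket accumulator dict
def bllAcc (a b c d e : List (List (String × String))) : PySem.Dict String (List (List (String × String))) :=
  PySem.Dict.mk [("planetary", a), ("500", b), ("850", c), ("mslp", d), ("other", e)]

theorem bllStep_planetary (s : List (String × String)) (a b c d e : List (List (String × String)))
    (h : bll_isPlanetary s = true) :
    bllStep (bllAcc a b c d e) s = bllAcc (a ++ [s]) b c d e := by
  simp [bll_isPlanetary, PySem.Dict.getD, PySem.Dict.get?] at h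
  simp [bllStep, bllAcc, h, PySem.Dict.modify, PySem.Dict.get?, PySem.Dict.getD,
    PySem.Dict.contains, PySem.Dict.insert]

theorem bllStep_500 (s : List (String × String)) (a b c d e : List (List (String × String)))
    (hp : bll_isPlanetary s = false) (h : bll_levelOf s = "500") :
    bllStep (bllAcc a b c d e) s = bllAcc a (b ++ [s]) c d e := by
  simp [bll_isPlanetary, PySem.Dict.getD, PySem.Dict.get?] at hp; simp [bll_levelOf, PySem.Dict.getD, PySem.Dict.get?] at h
  simp [bllStep, bllAcc, hp, h, PySem.Dict.modify, PySem.Dict.get?, PySem.Dict.getD,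
    PySem.Dict.contains, PySem.Dict.insert]

theorem bllStep_850 (s : List (String × String)) (a b c d e : List (List (String × String)))
    (hp : bll_isPlanetary s = false) (h : bll_levelOf s = "850") :
    bllStep (bllAcc a b c d e) s = bllAcc a b (c ++ [s]) d e := by
  simp [bll_isPlanetary, PySem.Dict.getD, PySem.Dict.get?] at hp; simp [bll_levelOf, PySem.Dict.getD, PySem.Dict.get?] at h
  simp [bllStep, bllAcc, hp, h, PySem.Dict.modify, PySem.Dict.get?, PySem.Dict.getD,
    PySem.Dict.contains, PySem.Dict.insert]

theorem bllStep_mslp (s : List (String × String)) (a b c d e : List (List (String × String)))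
    (hp : bll_isPlanetary s = false) (h : bll_levelOf s = "mslp") :
    bllStep (bllAcc a b c d e) s = bllAcc a b c (d ++ [s]) e := by
  simp [bll_isPlanetary, PySem.Dict.getD, PySem.Dict.get?] at hp; simp [bll_levelOf, PySem.Dict.getD, PySem.Dict.get?] at h
  simp [bllStep, bllAcc, hp, h, PySem.Dict.modify, PySem.Dict.get?, PySem.Dict.getD,
    PySem.Dict.contains, PySem.Dict.insert]

theorem bllStep_other (s : List (String × String)) (a b c d e : List (List (String × String)))
    (hp : bll_isPlanetary s = false) (h5 : ¬ bll_levelOf s = "500")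
    (h8 : ¬ bll_levelOf s = "850") (hm : ¬ bll_levelOf s = "mslp") :
    bllStep (bllAcc a b c d e) s = bllAcc a b c d (e ++ [s]) := by
  simp [bll_isPlanetary, PySem.Dict.getD, PySem.Dict.get?] at hp; simp [bll_levelOf, PySem.Dict.getD, PySem.Dict.get?] at h5 h8 hm
  simp [bllStep, bllAcc, hp, h5, h8, hm, PySem.Dict.modify, PySem.Dict.get?, PySem.Dict.getD,
    PySem.Dict.contains, PySem.Dict.insert]

theorem bll_invariant (systems : List (List (String × String)))
    (a b c d e : List (List (String × String))) :
    (systems.foldl bllStep (bllAcc a b c d e)).items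
    = [ ("planetary", a ++ systems.filter (fun s => bll_isPlanetary s)),
        ("500", b ++ systems.filter (fun s => !bll_isPlanetary s && bll_levelOf s == "500")),
        ("850", c ++ systems.filter (fun s => !bll_isPlanetary s && bll_levelOf s == "850")),
        ("mslp", d ++ systems.filter (fun s => !bll_isPlanetary s && bll_levelOf s == "mslp")),
        ("other", e ++ systems.filter (fun s =>
          !bll_isPlanetary s && !(bll_levelOf s == "500" || bll_levelOf s == "850" || bll_levelOf s == "mslp"))) ] := by
  induction systems generalizing a b c d e with
  | nil => simp [bllAcc]
  | cons s rest ih =>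
    rw [List.foldl_cons]
    by_cases hp : bll_isPlanetary s
    · rw [bllStep_planetary s a b c d e hp, ih]
      simp [hp]
    · have hp' : bll_isPlanetary s = false := by simpa using hp
      by_cases h5 : bll_levelOf s = "500"
      · rw [bllStep_500 s a b c d e hp' h5, ih]
        simp [List.filter_cons, hp', h5]
      · by_cases h8 : bll_levelOf s = "850"
        · rw [bllStep_850 s a b c d e hp' h8, ih]
          simp [List.filter_cons, hp', h5, h8]
        · by_cases hm : bll_levelOf s = "mslp"
          · rw [bllStep_mslp s a b c d e hp' hm, ih]
            simp [List.filter_cons, hp', h5, h8, hm]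
          · rw [bllStep_other s a b c d e hp' h5 h8 hm, ih]
            simp [List.filter_cons, hp', h5, h8, hm]

-- ===== VERDICT (by name: the statement is the Claim_ definition above) =====
theorem build_level_layers_spec : Claim_equal_build_level_layers := by
  intro systems _
  unfold Spec_build_level_layers build_level_layers build_level_layers_alt
  simpa [PySem.Dict.ofList, bllAcc] using bll_invariant systems [] [] [] [] []
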